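-- pv_equiv track=rewrite | github.com/AlphaTechnic/Algorithm_Study | 2021_random_set_self_practice/using_python/뉴스클러스터링.py | union_counter
-- ===== SOURCE A (Python) =====
-- from collections import defaultdict
--
-- def union_counter(counter1, counter2):
--     dic = defaultdict(int)
--     for key, num in counter1.items():
--         dic[key] += num
--     for key, num in counter2.items():
--         dic[key] = max(dic[key], num)
--
--     tot = 0
--     for _, num in dic.items():
--         tot += num
--     return tot
-- ===== SOURCE B (Python) =====
-- def union_counter(counter1, counter2):
--     # inclusion-exclusion: sum(max(a,b)) over the union of keys, where a missing
--     # key counts as 0, equals t1 + t2 - sum over counter2's keys of min(counter1.get(k,0), num)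
--     t1 = sum(counter1.values())
--     t2 = sum(counter2.values())
--     inter = sum(min(counter1.get(k, 0), num) for k, num in counter2.items())
--     return t1 + t2 - inter
-- ===== Notes on version B (the rewrite author's own statement) =====
-- stated objective: alternative
-- what changed: Replaces the build-a-merged-max-dict-then-sum strategy by inclusion-exclusion: total1 + total2 minus the sum of min(counter1.get(k,0), num) over counter2's items, so no merged dict is ever materialized.
import Mathlib
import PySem

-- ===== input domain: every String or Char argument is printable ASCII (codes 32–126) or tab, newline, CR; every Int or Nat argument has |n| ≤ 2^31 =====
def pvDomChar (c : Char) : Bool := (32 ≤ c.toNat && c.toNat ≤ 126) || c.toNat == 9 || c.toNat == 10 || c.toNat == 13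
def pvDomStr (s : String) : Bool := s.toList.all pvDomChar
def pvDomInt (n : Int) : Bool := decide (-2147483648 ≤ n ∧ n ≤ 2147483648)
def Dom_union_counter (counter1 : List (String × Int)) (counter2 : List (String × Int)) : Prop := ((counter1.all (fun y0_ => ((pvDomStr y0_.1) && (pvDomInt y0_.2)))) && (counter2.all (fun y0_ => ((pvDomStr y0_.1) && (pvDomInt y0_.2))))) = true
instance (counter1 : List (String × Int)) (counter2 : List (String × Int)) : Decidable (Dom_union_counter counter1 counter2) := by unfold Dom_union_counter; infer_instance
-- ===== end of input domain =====

-- B computes the same union total by inclusion-exclusion (t1 + t2 - Σ min) instead of building the merged max-dict; alternative decomposition, same cost.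


-- ===== PORT A =====
-- counter1/counter2 are Python dicts: the association lists are read as dicts (PySem.Dict.ofList)
def union_counter (counter1 : List (String × Int)) (counter2 : List (String × Int)) : Int :=
  let c1 := PySem.Dict.ofList counter1
  let c2 := PySem.Dict.ofList counter2
  -- dic = defaultdict(int); for key, num in counter1.items(): dic[key] += num
  let dic := c1.items.foldl (fun d p => d.modify p.1 0 (fun v => v + p.2))
               (PySem.Dict.empty : PySem.Dict String Int)
  -- for key, num in counter2.items(): dic[key] = max(dic[key], num)
  let dic := c2.items.foldl (fun d p => d.modify p.1 0 (fun v => max v p.2)) dic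
  -- tot = 0; for _, num in dic.items(): tot += num
  dic.items.foldl (fun tot p => tot + p.2) 0

-- ===== PORT B =====
def union_counter_alt (counter1 : List (String × Int)) (counter2 : List (String × Int)) : Int :=
  let c1 := PySem.Dict.ofList counter1
  let c2 := PySem.Dict.ofList counter2
  let t1 := c1.values.sum
  let t2 := c2.values.sum
  let inter := (c2.items.map (fun p => min (c1.getD p.1 0) p.2)).sum
  t1 + t2 - inter

-- ===== PRECONDITION & SPEC =====
def Spec_union_counter (counter1 : List (String × Int)) (counter2 : List (String × Int)) (out : Int) : Prop := out = union_counter_alt counter1 counter2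
instance (counter1 : List (String × Int)) (counter2 : List (String × Int)) (out : Int) : Decidable (Spec_union_counter counter1 counter2 out) := by unfold Spec_union_counter; infer_instance

-- ===== CLAIM (what is proved, stated in full; the proofs are below) =====
def Claim_equal_union_counter : Prop := ∀ (counter1 : List (String × Int)) (counter2 : List (String × Int)), Dom_union_counter counter1 counter2 → Spec_union_counter counter1 counter2 (union_counter counter1 counter2)

-- ===== LEMMAS AND PROOFS =====

-- value of a `dic[k] = f(dic[k], num)`-style fold over an assoc list with distinct keys
theorem foldl_modify_getD (f : Int → Int → Int) :
    ∀ (l : List (String × Int)) (d : PySem.Dict String Int) (k : String),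
      (l.map Prod.fst).Nodup →
      ((l.foldl (fun d p => d.modify p.1 0 (fun v => f v p.2)) d).getD k 0) =
        (match (PySem.Dict.mk l).get? k with
          | some v => f (d.getD k 0) v
          | none => d.getD k 0) := by
  intro l
  induction l with
  | nil => intro d k _; simp [PySem.Dict.get?]
  | cons a l ih =>
    intro d k hnd
    simp only [List.map_cons, List.nodup_cons] at hnd
    simp only [List.foldl_cons]
    rw [ih _ k hnd.2, PySem.Dict.get?_mk_cons]
    by_cases hk : k = a.1
    · subst hk
      have hnone : (PySem.Dict.mk l).get? a.1 = none := by
        rw [PySem.Dict.get?_eq_none_iff_not_mem_keys]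
        simpa [PySem.Dict.keys] using hnd.1
      simp [hnone, PySem.Dict.getD_modify_self]
    · have hba : (a.1 == k) = false := by simp [Ne.symm hk]
      rw [PySem.Dict.getD_modify_of_ne _ _ _ hk]
      simp [hba]

theorem sum_map_sub (l : List String) (x y : String → Int) :
    (l.map (fun k => x k - y k)).sum = (l.map x).sum - (l.map y).sum := by
  induction l with
  | nil => simp
  | cons a l ih => simp [ih]; ring

theorem sum_map_ite (l : List String) (p : String → Bool) (x y : String → Int) :
    (l.map (fun k => if p k then x k else y k)).sum
      = (l.map y).sum + ((l.filter p).map (fun k => x k - y k)).sum := by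
  induction l with
  | nil => simp
  | cons a l ih =>
    by_cases h : p a <;> simp [h, ih] <;> ring

theorem sum_map_filter_split (l : List String) (p : String → Bool) (g : String → Int) :
    (l.map g).sum = ((l.filter p).map g).sum + ((l.filter (fun k => !p k)).map g).sum := by
  induction l with
  | nil => simp
  | cons a l ih =>
    by_cases h : p a <;> simp [h, ih] <;> ring

-- ===== VERDICT (by name: the statement is the Claim_ definition above) =====
theorem union_counter_spec : Claim_equal_union_counter := by
  intro counter1 counter2 _
  unfold Spec_union_counter
  simp only [union_counter, union_counter_alt]
  set c1 := PySem.Dict.ofList counter1 with hc1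
  set c2 := PySem.Dict.ofList counter2 with hc2
  have hn1 : c1.keys.Nodup := PySem.Dict.nodup_keys_ofList counter1
  have hn2 : c2.keys.Nodup := PySem.Dict.nodup_keys_ofList counter2
  have hK1 : (c1.items.map Prod.fst).Nodup := hn1
  have hK2 : (c2.items.map Prod.fst).Nodup := hn2
  set d1 := c1.items.foldl (fun d p => d.modify p.1 0 (fun v => v + p.2))
      (PySem.Dict.empty : PySem.Dict String Int) with hd1def
  set dic := c2.items.foldl (fun d p => d.modify p.1 0 (fun v => max v p.2)) d1 with hdicdef
  -- after the first loop the dict has exactly counter1's entries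
  have hd1 : ∀ k, d1.getD k 0 = c1.getD k 0 := by
    intro k
    have h : d1.getD k 0 = (match (PySem.Dict.mk c1.items).get? k with
        | some v => (PySem.Dict.empty : PySem.Dict String Int).getD k 0 + v
        | none => (PySem.Dict.empty : PySem.Dict String Int).getD k 0) :=
      foldl_modify_getD (fun v n => v + n) c1.items PySem.Dict.empty k hK1
    have hmk : (PySem.Dict.mk c1.items) = c1 := rfl
    rw [hmk] at h
    rcases hg : c1.get? k with _ | v
    · simp [hg, PySem.Dict.getD_eq_get?_getD] at h ⊢
      simpa using h
    · rw [PySem.Dict.getD_of_get?_eq_some _ _ hg]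
      simp [hg, PySem.Dict.getD_empty] at h
      exact h
  have hd1keys : d1.keys = c1.keys := by
    have h : d1.keys = PySem.Set.update (PySem.Dict.empty : PySem.Dict String Int).keys
        (c1.items.map Prod.fst) :=
      PySem.Dict.keys_foldl_modify_key c1.items Prod.fst 0 (fun _ p v => v + p.2) _
    rw [h]
    have : (PySem.Dict.empty : PySem.Dict String Int).keys = [] := rfl
    rw [this, PySem.Set.update_nil_left, PySem.Set.ofList_eq_self_of_nodup _ hK1]
    rfl
  have hnd1 : d1.keys.Nodup := by rw [hd1keys]; exact hn1
  -- after the second loop: max with counter2 where present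
  have hdic : ∀ k, dic.getD k 0 =
      if k ∈ c2.keys then c1.getD k 0 + c2.getD k 0 - min (c1.getD k 0) (c2.getD k 0)
      else c1.getD k 0 := by
    intro k
    have h : dic.getD k 0 = (match (PySem.Dict.mk c2.items).get? k with
        | some v => max (d1.getD k 0) v
        | none => d1.getD k 0) :=
      foldl_modify_getD (fun v n => max v n) c2.items d1 k hK2
    have hmk : (PySem.Dict.mk c2.items) = c2 := rfl
    rw [hmk] at h
    rcases hg : c2.get? k with _ | v
    · have hnm : k ∉ c2.keys := (PySem.Dict.get?_eq_none_iff_not_mem_keys c2 k).1 hg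
      simp only [hg] at h
      rw [h, hd1 k, if_neg hnm]
    · have hm : k ∈ c2.keys := by
        by_contra hnm
        rw [← PySem.Dict.get?_eq_none_iff_not_mem_keys] at hnm
        rw [hnm] at hg; cases hg
      have hv : c2.getD k 0 = v := PySem.Dict.getD_of_get?_eq_some _ _ hg
      simp only [hg] at h
      rw [h, hd1 k, if_pos hm, hv]
      rcases le_total (c1.getD k 0) v with h1 | h1
      · rw [max_eq_right h1, min_eq_left h1]; ring
      · rw [max_eq_left h1, min_eq_right h1]; ring
  have hdickeys : dic.keys = c1.keys ++ c2.keys.filter (fun k => !c1.keys.contains k) := by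
    have h : dic.keys = PySem.Set.update d1.keys (c2.items.map Prod.fst) :=
      PySem.Dict.keys_foldl_modify_key c2.items Prod.fst 0 (fun _ p v => max v p.2) d1
    have hk2 : c2.items.map Prod.fst = c2.keys := rfl
    rw [h, hk2, hd1keys, PySem.Set.update_eq_append_filter,
        PySem.Set.ofList_eq_self_of_nodup _ hn2]
    simp [PySem.Set.contains_eq_listContains]
  have hnddic : dic.keys.Nodup := PySem.Dict.nodup_keys_foldl_modify_key _ _ _ _ _ hnd1
  -- the final accumulation loop is the sum of dic's values
  rw [PySem.List.foldl_add dic.items (fun p => p.2) 0, zero_add,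
      PySem.Dict.items_eq_map_keys dic hnddic 0, List.map_map]
  -- B's three sums, as sums over key lists
  rw [PySem.Dict.values_eq_map_keys c1 hn1 0, PySem.Dict.values_eq_map_keys c2 hn2 0,
      PySem.Dict.items_eq_map_keys c2 hn2 0, List.map_map]
  have hcomp : ((fun p : String × Int => min (c1.getD p.1 0) p.2) ∘ (fun k => (k, c2.getD k 0)))
      = fun k => min (c1.getD k 0) (c2.getD k 0) := rfl
  rw [hcomp]
  have hcomp2 : ((fun p : String × Int => p.2) ∘ (fun k => (k, dic.getD k 0)))
      = fun k => dic.getD k 0 := rfl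
  rw [hcomp2, hdickeys, List.map_append, List.sum_append]
  have hmem1 : ∀ k : String, c1.keys.contains k = true ↔ k ∈ c1.keys := by
    intro k; simp
  have hmem2 : ∀ k : String, c2.keys.contains k = true ↔ k ∈ c2.keys := by
    intro k; simp
  -- Σ over counter1's keys of the merged dict's values
  have hA1 : (c1.keys.map (fun k => dic.getD k 0)).sum
      = (c1.keys.map (fun k => c1.getD k 0)).sum
        + ((c1.keys.filter (fun k => c2.keys.contains k)).map
            (fun k => (c1.getD k 0 + c2.getD k 0 - min (c1.getD k 0) (c2.getD k 0)) - c1.getD k 0)).sum := by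
    have hm : (c1.keys.map (fun k => dic.getD k 0))
        = c1.keys.map (fun k => if c2.keys.contains k then
            c1.getD k 0 + c2.getD k 0 - min (c1.getD k 0) (c2.getD k 0) else c1.getD k 0) := by
      apply List.map_congr_left; intro k _
      rw [hdic k]
      by_cases hq : k ∈ c2.keys
      · rw [if_pos hq, if_pos ((hmem2 k).2 hq)]
      · rw [if_neg hq, if_neg (by simpa [hmem2 k] using hq)]
    rw [hm, sum_map_ite]
  -- Σ over counter2-only keys: there counter1 contributes 0
  have hA2 : ((c2.keys.filter (fun k => !c1.keys.contains k)).map (fun k => dic.getD k 0)).sum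
      = ((c2.keys.filter (fun k => !c1.keys.contains k)).map
          (fun k => c2.getD k 0 - min (c1.getD k 0) (c2.getD k 0))).sum := by
    apply congrArg
    apply List.map_congr_left; intro k hk
    rcases List.mem_filter.1 hk with ⟨hk2, hknp⟩
    have hknotc1 : k ∉ c1.keys := by
      intro hmem
      rw [(hmem1 k).2 hmem] at hknp; simp at hknp
    have hV1 : c1.getD k 0 = 0 := by
      apply PySem.Dict.getD_of_not_contains
      rw [PySem.Dict.contains_eq_decide_mem_keys]
      simp [hknotc1]
    rw [hdic k, if_pos hk2, hV1]
    omega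
  rw [hA1, hA2]
  -- split B's Σ_{c2}(V2 - min) along membership in counter1
  have hB : (c2.keys.map (fun k => c2.getD k 0)).sum
        - (c2.keys.map (fun k => min (c1.getD k 0) (c2.getD k 0))).sum
      = ((c2.keys.filter (fun k => c1.keys.contains k)).map
          (fun k => c2.getD k 0 - min (c1.getD k 0) (c2.getD k 0))).sum
        + ((c2.keys.filter (fun k => !c1.keys.contains k)).map
            (fun k => c2.getD k 0 - min (c1.getD k 0) (c2.getD k 0))).sum := by
    rw [← sum_map_sub c2.keys (fun k => c2.getD k 0) (fun k => min (c1.getD k 0) (c2.getD k 0))]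
    exact sum_map_filter_split c2.keys (fun k => c1.keys.contains k)
      (fun k => c2.getD k 0 - min (c1.getD k 0) (c2.getD k 0))
  -- the two intersection sums range over the same (nodup) set of keys
  have hperm : (c1.keys.filter (fun k => c2.keys.contains k)).Perm
      (c2.keys.filter (fun k => c1.keys.contains k)) := by
    rw [List.perm_ext_iff_of_nodup (hn1.filter _) (hn2.filter _)]
    intro k
    simp only [List.mem_filter, hmem1 k, hmem2 k]
    tauto
  have hinter : ((c1.keys.filter (fun k => c2.keys.contains k)).map
        (fun k => (c1.getD k 0 + c2.getD k 0 - min (c1.getD k 0) (c2.getD k 0)) - c1.getD k 0)).sum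
      = ((c2.keys.filter (fun k => c1.keys.contains k)).map
          (fun k => c2.getD k 0 - min (c1.getD k 0) (c2.getD k 0))).sum := by
    have he : (fun k => (c1.getD k 0 + c2.getD k 0 - min (c1.getD k 0) (c2.getD k 0)) - c1.getD k 0)
        = fun k : String => c2.getD k 0 - min (c1.getD k 0) (c2.getD k 0) := by
      funext k; ring
    rw [he]
    exact (hperm.map _).sum_eq
  omega
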